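-- pv_equiv track=rewrite | github.com/RuYunW/ADG-Seq2Seq | utils.py | doc_to_seq
-- ===== SOURCE A (Python) =====
-- def doc_to_seq(docs):
--     w2i = {"_PAD": 0, "_GO": 1, "_EOS": 2}
--     i2w = {0: "_PAD", 1: "_GO", 2: "_EOS"}
--     seqs = []
--     for doc in docs:
--         seq = []
--         # doc = re.sub('[^\w]', ' ', doc)  # del char
--         # for w in list(filter(None, doc.split(' '))):  # del null
--         for w in doc.split(' '):
--             if w not in w2i:
--                 i2w[len(w2i)] = w  # generate dictionary again
--                 w2i[w] = len(w2i)
--             seq.append(w2i[w])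
--         seqs.append(seq)
--     return seqs, w2i, i2w
-- ===== SOURCE B (Python) =====
-- def doc_to_seq(docs):
--     # Pass 1: vocabulary only.
--     w2i = {"_PAD": 0, "_GO": 1, "_EOS": 2}
--     for doc in docs:
--         for w in doc.split(' '):
--             if w not in w2i:
--                 w2i[w] = len(w2i)
--     # Invert once; indices are distinct, so this is exact.
--     i2w = {i: w for w, i in w2i.items()}
--     # Pass 2: encode with the finished vocabulary.
--     seqs = [[w2i[w] for w in doc.split(' ')] for doc in docs]
--     return seqs, w2i, i2w
-- ===== Notes on version B (the rewrite author's own statement) =====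
-- stated objective: simpler
-- what changed: A interleaves building seqs, w2i and i2w in one nested loop over a triple state; B builds only w2i in a first pass, derives i2w by a single swap comprehension, and encodes all docs in a second pass against the finished vocabulary.
import Mathlib
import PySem

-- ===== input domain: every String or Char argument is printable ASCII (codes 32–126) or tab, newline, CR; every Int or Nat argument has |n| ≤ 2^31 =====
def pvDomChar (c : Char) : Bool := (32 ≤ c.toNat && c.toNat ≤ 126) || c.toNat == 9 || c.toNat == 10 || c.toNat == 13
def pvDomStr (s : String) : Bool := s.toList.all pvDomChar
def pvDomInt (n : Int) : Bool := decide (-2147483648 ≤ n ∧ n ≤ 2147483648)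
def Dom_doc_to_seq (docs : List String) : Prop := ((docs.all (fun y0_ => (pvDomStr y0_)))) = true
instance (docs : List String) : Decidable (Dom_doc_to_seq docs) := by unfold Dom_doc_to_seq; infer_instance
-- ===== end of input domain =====

-- B builds the vocabulary alone in a first pass, inverts it once, and encodes all docs in a
-- second pass against the finished vocabulary — simpler than A's single nested loop over a
-- (seqs, w2i, i2w) triple; same asymptotic cost.


-- doc.split(' '): sep is the non-empty literal " ", so split? always returns some (exact).
def pvWords (doc : String) : List String := (PySem.Str.split? doc " ").getD [""]

-- ===== PORT A =====
-- A's inner loop body: state (seq, w2i, i2w); Python updates i2w and w2i with the old len(w2i),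
-- then appends w2i[w] (present by then; getD with dummy default 0 is exact).
def aInner (st : List Int × PySem.Dict String Int × PySem.Dict Int String) (w : String) :
    List Int × PySem.Dict String Int × PySem.Dict Int String :=
  if st.2.1.contains w then
    (st.1 ++ [st.2.1.getD w 0], st.2.1, st.2.2)
  else
    (st.1 ++ [(st.2.1.insert w (st.2.1.size : Int)).getD w 0],
     st.2.1.insert w (st.2.1.size : Int),
     st.2.2.insert (st.2.1.size : Int) w)

def aOuter (st : List (List Int) × PySem.Dict String Int × PySem.Dict Int String) (doc : String) :
    List (List Int) × PySem.Dict String Int × PySem.Dict Int String :=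
  (st.1 ++ [((pvWords doc).foldl aInner ([], st.2.1, st.2.2)).1],
   ((pvWords doc).foldl aInner ([], st.2.1, st.2.2)).2.1,
   ((pvWords doc).foldl aInner ([], st.2.1, st.2.2)).2.2)

def doc_to_seq (docs : List String) :
    List (List Int) × (List (String × Int)) × (List (Int × String)) :=
  let st := docs.foldl aOuter
    ([], PySem.Dict.ofList [("_PAD", 0), ("_GO", 1), ("_EOS", 2)],
         PySem.Dict.ofList [(0, "_PAD"), (1, "_GO"), (2, "_EOS")])
  (st.1, st.2.1.items, st.2.2.items)

-- ===== PORT B =====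
-- B's vocabulary step: add w at index len(w2i) if unseen.
def bAdd (d : PySem.Dict String Int) (w : String) : PySem.Dict String Int :=
  if d.contains w then d else d.insert w (d.size : Int)

def doc_to_seq_alt (docs : List String) :
    List (List Int) × (List (String × Int)) × (List (Int × String)) :=
  -- pass 1: vocabulary only
  let w2i := docs.foldl (fun d doc => (pvWords doc).foldl bAdd d)
    (PySem.Dict.ofList [("_PAD", 0), ("_GO", 1), ("_EOS", 2)])
  -- {i: w for w, i in w2i.items()}: the indices are pairwise distinct, so the comprehension's
  -- items are exactly the swapped pairs in order (exact).
  let i2w := w2i.items.map (fun p => (p.2, p.1))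
  -- pass 2: encode against the finished vocabulary (every word is present; default 0 unused)
  let seqs := docs.map (fun doc => (pvWords doc).map (fun w => w2i.getD w 0))
  (seqs, w2i.items, i2w)

-- ===== PRECONDITION & SPEC =====
def Spec_doc_to_seq (docs : List String) (out : List (List Int) × (List (String × Int)) × (List (Int × String))) : Prop := out = doc_to_seq_alt docs
instance (docs : List String) (out : List (List Int) × (List (String × Int)) × (List (Int × String))) : Decidable (Spec_doc_to_seq docs out) := by unfold Spec_doc_to_seq; infer_instance

-- ===== CLAIM (what is proved, stated in full; the proofs are below) =====
def Claim_equal_doc_to_seq : Prop := ∀ (docs : List String), Dom_doc_to_seq docs → Spec_doc_to_seq docs (doc_to_seq docs)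

-- ===== LEMMAS AND PROOFS =====

-- B's vocabulary fold over one doc, named for the proofs.
def bDoc (d : PySem.Dict String Int) (doc : String) : PySem.Dict String Int :=
  (pvWords doc).foldl bAdd d

-- one step of A's inner loop, written with bAdd
theorem aInner_eq (seq : List Int) (w2i : PySem.Dict String Int) (i2w : PySem.Dict Int String)
    (w : String) :
    aInner (seq, w2i, i2w) w
      = (seq ++ [(bAdd w2i w).getD w 0], bAdd w2i w,
         if w2i.contains w then i2w else i2w.insert (w2i.size : Int) w) := by
  unfold aInner bAdd
  by_cases hc : w2i.contains w <;> simp [hc]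

-- monotonicity: bAdd never changes an existing binding
theorem get?_bAdd (d : PySem.Dict String Int) (w x : String) (v : Int)
    (h : d.get? x = some v) : (bAdd d w).get? x = some v := by
  unfold bAdd
  split
  · exact h
  · rename_i hc
    rcases eq_or_ne x w with rfl | hne
    · rw [PySem.Dict.contains_eq_isSome_get?, h] at hc
      simp at hc
    · rw [PySem.Dict.get?_insert_of_ne _ _ hne]
      exact h

theorem get?_foldl_bAdd (ws : List String) (d : PySem.Dict String Int) (x : String) (v : Int)
    (h : d.get? x = some v) : (ws.foldl bAdd d).get? x = some v := by
  induction ws generalizing d with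
  | nil => exact h
  | cons w ws ih => exact ih _ (get?_bAdd d w x v h)

theorem get?_foldl_bDoc (docs : List String) (d : PySem.Dict String Int) (x : String) (v : Int)
    (h : d.get? x = some v) : (docs.foldl bDoc d).get? x = some v := by
  induction docs generalizing d with
  | nil => exact h
  | cons doc docs ih => exact ih _ (get?_foldl_bAdd _ d x v h)

-- after bAdd, w is bound
theorem isSome_get?_bAdd (d : PySem.Dict String Int) (w : String) :
    ((bAdd d w).get? w).isSome := by
  unfold bAdd
  split
  · rename_i hc
    rw [← PySem.Dict.contains_eq_isSome_get?]
    exact hc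
  · simp [PySem.Dict.get?_insert_self]

-- every word of ws is bound after folding bAdd over ws
theorem isSome_get?_foldl_bAdd (ws : List String) (d : PySem.Dict String Int) (w : String)
    (hw : w ∈ ws) : ((ws.foldl bAdd d).get? w).isSome := by
  induction ws generalizing d with
  | nil => cases hw
  | cons a ws ih =>
    rcases List.mem_cons.1 hw with rfl | hw'
    · rw [List.foldl_cons]
      rcases Option.isSome_iff_exists.1 (isSome_get?_bAdd d w) with ⟨v, hv⟩
      rw [get?_foldl_bAdd ws _ w v hv]
      rfl
    · exact ih _ hw'

-- getD is stable under any binding-preserving extension once the key is bound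
theorem getD_stable (d d' : PySem.Dict String Int) (w : String)
    (hs : (d.get? w).isSome)
    (hmono : ∀ x v, d.get? x = some v → d'.get? x = some v) :
    d'.getD w 0 = d.getD w 0 := by
  rcases Option.isSome_iff_exists.1 hs with ⟨v, hv⟩
  rw [PySem.Dict.getD_of_get?_eq_some _ _ hv,
      PySem.Dict.getD_of_get?_eq_some _ _ (hmono w v hv)]

-- A's inner fold: w2i component is B's bAdd fold
theorem inner_w2i (ws : List String) (seq : List Int) (w2i : PySem.Dict String Int)
    (i2w : PySem.Dict Int String) :
    (ws.foldl aInner (seq, w2i, i2w)).2.1 = ws.foldl bAdd w2i := by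
  induction ws generalizing seq w2i i2w with
  | nil => rfl
  | cons w ws ih =>
    rw [List.foldl_cons, aInner_eq, List.foldl_cons]
    exact ih _ _ _

-- A's inner fold: seq component = the words encoded with the dict after this doc
theorem inner_seq (ws : List String) (seq : List Int) (w2i : PySem.Dict String Int)
    (i2w : PySem.Dict Int String) :
    (ws.foldl aInner (seq, w2i, i2w)).1
      = seq ++ ws.map (fun w => (ws.foldl bAdd w2i).getD w 0) := by
  induction ws generalizing seq w2i i2w with
  | nil => simp
  | cons w ws ih =>
    have hstable : (ws.foldl bAdd (bAdd w2i w)).getD w 0 = (bAdd w2i w).getD w 0 :=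
      getD_stable _ _ w (isSome_get?_bAdd w2i w)
        (fun x v h => get?_foldl_bAdd ws _ x v h)
    rw [List.foldl_cons, aInner_eq, ih, List.foldl_cons, List.map_cons, hstable]
    simp

-- the invariant tying A's i2w to its w2i: items are the swapped pairs, values are 0,1,…
def pvInv (d : PySem.Dict String Int) (e : PySem.Dict Int String) : Prop :=
  e.items = d.items.map (fun p => (p.2, p.1)) ∧
  d.items.map Prod.snd = (List.range d.items.length).map Int.ofNat

theorem inv_bAdd (w : String) (d : PySem.Dict String Int) (e : PySem.Dict Int String)
    (h : pvInv d e) :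
    pvInv (bAdd d w) (if d.contains w then e else e.insert (d.size : Int) w) := by
  rcases h with ⟨h1, h2⟩
  by_cases hc : d.contains w
  · unfold bAdd
    simp only [hc, if_true]
    exact ⟨h1, h2⟩
  · simp only [Bool.not_eq_true] at hc
    have hb : bAdd d w = d.insert w (d.size : Int) := by unfold bAdd; simp [hc]
    simp only [hc, Bool.false_eq_true, if_false, hb]
    have hek : e.contains ((d.size : Int)) = false := by
      rw [← Bool.not_eq_true, PySem.Dict.contains_iff_mem_keys]
      intro hm
      simp only [PySem.Dict.keys, h1, List.map_map] at hm
      have hm2 : (d.size : Int) ∈ d.items.map Prod.snd := by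
        simpa [Function.comp] using hm
      rw [h2] at hm2
      rcases List.mem_map.1 hm2 with ⟨n, hn, he⟩
      rw [List.mem_range] at hn
      have hsz : (n : Int) = (d.items.length : Int) := by
        simpa [PySem.Dict.size] using he
      omega
    refine ⟨?_, ?_⟩
    · rw [PySem.Dict.items_insert_of_not_contains _ _ hek,
          PySem.Dict.items_insert_of_not_contains _ _ hc, h1, List.map_append]
      rfl
    · rw [PySem.Dict.items_insert_of_not_contains _ _ hc, List.map_append,
          List.length_append, h2]
      simp [List.range_succ, PySem.Dict.size]

-- A's inner fold keeps the invariant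
theorem inner_i2w (ws : List String) (seq : List Int) (w2i : PySem.Dict String Int)
    (i2w : PySem.Dict Int String) (h : pvInv w2i i2w) :
    pvInv (ws.foldl bAdd w2i) (ws.foldl aInner (seq, w2i, i2w)).2.2 := by
  induction ws generalizing seq w2i i2w with
  | nil => exact h
  | cons w ws ih =>
    rw [List.foldl_cons, List.foldl_cons, aInner_eq]
    exact ih _ _ _ (inv_bAdd w w2i i2w h)

-- one step of A's outer loop: the w2i component is bDoc
theorem aOuter_w2i (st : List (List Int) × PySem.Dict String Int × PySem.Dict Int String)
    (doc : String) : (aOuter st doc).2.1 = bDoc st.2.1 doc := by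
  simp only [aOuter, bDoc]
  rw [inner_w2i]

-- outer fold, w2i component
theorem outer_w2i (docs : List String)
    (st : List (List Int) × PySem.Dict String Int × PySem.Dict Int String) :
    (docs.foldl aOuter st).2.1 = docs.foldl bDoc st.2.1 := by
  induction docs generalizing st with
  | nil => rfl
  | cons doc docs ih =>
    rw [List.foldl_cons, List.foldl_cons, ih, aOuter_w2i]

-- outer fold, i2w component keeps the invariant
theorem outer_i2w (docs : List String)
    (st : List (List Int) × PySem.Dict String Int × PySem.Dict Int String)
    (h : pvInv st.2.1 st.2.2) :
    pvInv (docs.foldl bDoc st.2.1) (docs.foldl aOuter st).2.2 := by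
  induction docs generalizing st with
  | nil => exact h
  | cons doc docs ih =>
    rw [List.foldl_cons, List.foldl_cons]
    have hstep : pvInv (aOuter st doc).2.1 (aOuter st doc).2.2 := by
      rw [aOuter_w2i]
      simp only [aOuter, bDoc]
      exact inner_i2w _ _ _ _ h
    have := ih (aOuter st doc) hstep
    rwa [aOuter_w2i] at this

-- outer fold, seqs component = B's second pass with the final dictionary
theorem outer_seqs (docs : List String)
    (st : List (List Int) × PySem.Dict String Int × PySem.Dict Int String) :
    (docs.foldl aOuter st).1
      = st.1 ++ docs.map (fun doc =>
          (pvWords doc).map (fun w => (docs.foldl bDoc st.2.1).getD w 0)) := by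
  induction docs generalizing st with
  | nil => simp
  | cons doc docs ih =>
    rw [List.foldl_cons, ih, List.foldl_cons, List.map_cons, aOuter_w2i]
    have h1 : (aOuter st doc).1
        = st.1 ++ [(pvWords doc).map (fun w => (bDoc st.2.1 doc).getD w 0)] := by
      simp only [aOuter, bDoc]
      rw [inner_seq]
      simp
    rw [h1]
    have h2 : ((pvWords doc).map (fun w => (docs.foldl bDoc (bDoc st.2.1 doc)).getD w 0))
        = (pvWords doc).map (fun w => (bDoc st.2.1 doc).getD w 0) := by
      apply List.map_congr_left
      intro w hw
      exact getD_stable _ _ w (isSome_get?_foldl_bAdd _ _ _ hw)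
        (fun x v h => get?_foldl_bDoc docs _ x v h)
    rw [h2]
    simp

-- ===== VERDICT (by name: the statement is the Claim_ definition above) =====
theorem doc_to_seq_spec : Claim_equal_doc_to_seq := by
  intro docs _
  unfold Spec_doc_to_seq doc_to_seq doc_to_seq_alt
  have hw2i := outer_w2i docs
    ([], PySem.Dict.ofList [("_PAD", 0), ("_GO", 1), ("_EOS", 2)],
         PySem.Dict.ofList [(0, "_PAD"), (1, "_GO"), (2, "_EOS")])
  have hinv0 : pvInv (PySem.Dict.ofList [("_PAD", 0), ("_GO", 1), ("_EOS", 2)])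
      (PySem.Dict.ofList [(0, "_PAD"), (1, "_GO"), (2, "_EOS")]) := by
    constructor <;> decide
  have hi2w := outer_i2w docs
    ([], PySem.Dict.ofList [("_PAD", 0), ("_GO", 1), ("_EOS", 2)],
         PySem.Dict.ofList [(0, "_PAD"), (1, "_GO"), (2, "_EOS")]) hinv0
  have hseqs := outer_seqs docs
    ([], PySem.Dict.ofList [("_PAD", 0), ("_GO", 1), ("_EOS", 2)],
         PySem.Dict.ofList [(0, "_PAD"), (1, "_GO"), (2, "_EOS")])
  refine Prod.ext ?_ (Prod.ext ?_ ?_)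
  · simpa [bDoc] using hseqs
  · simpa [bDoc] using congrArg PySem.Dict.items hw2i
  · simpa [bDoc] using hi2w.1
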